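-- pv_equiv track=rewrite | github.com/Zwergengraf/skitter | skitter/core/session_memory.py | _analyze_section_sizes
-- ===== SOURCE A (Python) =====
-- def rough_token_estimate(text: str) -> int:
--     cleaned = text.strip()
--     if not cleaned:
--         return 0
--     return max(1, (len(cleaned) + 3) // 4)
--
-- def _analyze_section_sizes(content: str) -> tuple[dict[str, int], int]:
--     sections: dict[str, int] = {}
--     current_header = ""
--     current_lines: list[str] = []
--     for line in content.splitlines():
--         if line.startswith("# "):
--             if current_header:
--                 sections[current_header] = rough_token_estimate("\n".join(current_lines).strip())
--             current_header = line.strip()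
--             current_lines = []
--         else:
--             current_lines.append(line)
--     if current_header:
--         sections[current_header] = rough_token_estimate("\n".join(current_lines).strip())
--     return sections, rough_token_estimate(content)
-- ===== SOURCE B (Python) =====
-- def rough_token_estimate(text: str) -> int:
--     cleaned = text.strip()
--     if not cleaned:
--         return 0
--     return max(1, (len(cleaned) + 3) // 4)
--
-- def _segments(lines):
--     """Split lines into (header, body-lines) segments; lines before the first header are dropped."""
--     segs = []
--     n = len(lines)
--     i = 0
--     while i < n:
--         if lines[i].startswith("# "):
--             j = i + 1
--             while j < n and not lines[j].startswith("# "):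
--                 j += 1
--             segs.append((lines[i].strip(), lines[i + 1:j]))
--             i = j
--         else:
--             i += 1
--     return segs
--
-- def _analyze_section_sizes(content: str) -> tuple[dict[str, int], int]:
--     sections = {h: rough_token_estimate("\n".join(body).strip())
--                 for h, body in _segments(content.splitlines())}
--     return sections, rough_token_estimate(content)
-- ===== Notes on version B (the rewrite author's own statement) =====
-- stated objective: alternative
-- what changed: Replaces A's single stateful accumulator loop (pending header/lines flushed into the dict at each header and once after the loop) with a two-phase decomposition: an index-scan that cuts the line list into (header, body) segments, then a dict comprehension over the segments; no pending-state flush logic remains.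
import Mathlib
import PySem

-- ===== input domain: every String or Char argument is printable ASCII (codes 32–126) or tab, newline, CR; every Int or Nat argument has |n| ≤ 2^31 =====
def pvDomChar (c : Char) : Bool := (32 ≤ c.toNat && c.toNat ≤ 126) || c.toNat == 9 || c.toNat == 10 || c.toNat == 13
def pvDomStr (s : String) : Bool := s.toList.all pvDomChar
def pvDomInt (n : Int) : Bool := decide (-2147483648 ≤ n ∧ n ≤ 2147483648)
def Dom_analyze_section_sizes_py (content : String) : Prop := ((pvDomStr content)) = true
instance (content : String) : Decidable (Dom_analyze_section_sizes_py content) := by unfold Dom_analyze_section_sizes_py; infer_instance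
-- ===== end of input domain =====

-- B replaces A's stateful flush-on-header loop by a two-phase decomposition (cut into
-- (header, body) segments, then build the dict from the segment list); same cost, alternative structure.

-- shared helper: rough_token_estimate (identical code in both Pythons)
def pvRTE (text : String) : Int :=
  let cleaned := PySem.Str.strip text
  if cleaned = "" then 0 else max 1 (PySem.Int.floordiv (PySem.Str.len cleaned + 3) 4)

-- shared helper: token estimate of a section body, rough_token_estimate("\n".join(lines).strip())
def pvSecSize (lines : List String) : Int :=
  pvRTE (PySem.Str.strip (PySem.Str.join "\n" lines))

def pvIsHdr (line : String) : Bool := PySem.Str.startswith line "# "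

-- ===== PORT A =====
-- A's flush: 'if current_header: sections[current_header] = rough_token_estimate(...)'
def pvFin (st : PySem.Dict String Int × String × List String) : PySem.Dict String Int :=
  if st.2.1 ≠ "" then PySem.Dict.insert st.1 st.2.1 (pvSecSize st.2.2) else st.1

-- A's loop body over one line, state = (sections, current_header, current_lines)
def pvStepA (st : PySem.Dict String Int × String × List String) (line : String) :
    PySem.Dict String Int × String × List String :=
  if pvIsHdr line then (pvFin st, PySem.Str.strip line, [])
  else (st.1, st.2.1, st.2.2 ++ [line])

def analyze_section_sizes_py (content : String) : (List (String × Int)) × Int :=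
  ((pvFin ((PySem.Str.splitlines content).foldl pvStepA (PySem.Dict.empty, "", []))).items,
    pvRTE content)

-- ===== PORT B =====
-- B's first phase (_segments in Source B): cut the lines into (header, body) segments;
-- the index scan 'while j < n and not lines[j].startswith("# ")' is the takeWhile/dropWhile split.
def pvSegments : List String → List (String × List String)
  | [] => []
  | line :: rest =>
    if pvIsHdr line then
      (PySem.Str.strip line, rest.takeWhile (fun l => !pvIsHdr l)) ::
        pvSegments (rest.dropWhile (fun l => !pvIsHdr l))
    else pvSegments rest
termination_by l => l.length
decreasing_by
  · exact Nat.lt_succ_of_le (List.length_dropWhile_le _ rest)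
  · exact Nat.lt_succ_self _

-- B's second phase: the dict comprehension over the segments
def pvIns (d : PySem.Dict String Int) (hb : String × List String) : PySem.Dict String Int :=
  PySem.Dict.insert d hb.1 (pvSecSize hb.2)

def analyze_section_sizes_py_alt (content : String) : (List (String × Int)) × Int :=
  (((pvSegments (PySem.Str.splitlines content)).foldl pvIns PySem.Dict.empty).items,
    pvRTE content)

-- ===== PRECONDITION & SPEC =====
def Spec_analyze_section_sizes_py (content : String) (out : (List (String × Int)) × Int) : Prop := out = analyze_section_sizes_py_alt content
instance (content : String) (out : (List (String × Int)) × Int) : Decidable (Spec_analyze_section_sizes_py content out) := by unfold Spec_analyze_section_sizes_py; infer_instance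

-- ===== CLAIM (what is proved, stated in full; the proofs are below) =====
def Claim_equal_analyze_section_sizes_py : Prop := ∀ (content : String), Dom_analyze_section_sizes_py content → Spec_analyze_section_sizes_py content (analyze_section_sizes_py content)

-- ===== LEMMAS AND PROOFS =====

-- a non-space char in l survives Chars.strip, so the strip of such a list is nonempty
lemma strip_ne_of_mem (l : List Char) (c : Char) (hc : PySem.Chars.isspace c = false)
    (hm : c ∈ l) : PySem.Chars.strip l ≠ [] := by
  intro he
  simp only [PySem.Chars.strip, PySem.Chars.rstrip, PySem.Chars.lstrip,
    List.reverse_eq_nil_iff] at he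
  have hmem1 : c ∈ List.dropWhile PySem.Chars.isspace l := by
    have hsplit := List.takeWhile_append_dropWhile (p := PySem.Chars.isspace) (l := l)
    rcases List.mem_append.mp (by rw [hsplit]; exact hm) with h1 | h2
    · exact absurd (List.mem_takeWhile_imp h1) (by simp [hc])
    · exact h2
  have := List.dropWhile_eq_nil_iff.mp he c (List.mem_reverse.mpr hmem1)
  simp [hc] at this

-- a line starting with "# " strips to a nonempty string (it keeps its '#')
lemma strip_hdr_ne (line : String) (h : pvIsHdr line = true) : PySem.Str.strip line ≠ "" := by
  intro he
  have htl : PySem.Chars.strip line.toList = [] := by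
    have h1 := PySem.Str.toList_strip line
    rw [he] at h1; exact h1.symm
  have hpre : "# ".toList <+: line.toList := List.isPrefixOf_iff_prefix.mp
    (by simpa [pvIsHdr, PySem.Str.startswith, PySem.Chars.startswith] using h)
  rcases hpre with ⟨t, ht⟩
  have hmem : '#' ∈ line.toList := by
    rw [← ht]; exact List.mem_append.mpr (Or.inl (by decide))
  exact strip_ne_of_mem line.toList '#' (by decide) hmem htl

lemma loop_mid (rest : List String) :
    ∀ (d : PySem.Dict String Int) (hd : String) (ls : List String), hd ≠ "" →
    pvFin (rest.foldl pvStepA (d, hd, ls)) =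
      ((hd, ls ++ rest.takeWhile (fun l => !pvIsHdr l))
          :: pvSegments (rest.dropWhile (fun l => !pvIsHdr l))).foldl pvIns d := by
  induction rest with
  | nil => intro d hd ls hh; simp [pvFin, pvIns, pvSecSize, pvSegments, hh, List.foldl]
  | cons line rest ih =>
    intro d hd ls hh
    by_cases hl : pvIsHdr line = true
    · have hne := strip_hdr_ne line hl
      simp only [List.foldl, pvStepA, hl, if_pos]
      rw [ih (pvFin (d, hd, ls)) (PySem.Str.strip line) [] hne]
      simp [List.takeWhile, List.dropWhile, hl, pvSegments, pvFin, pvIns, hh, List.foldl]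
    · have hlf : pvIsHdr line = false := Bool.eq_false_iff.mpr hl
      simp only [List.foldl, pvStepA, hlf, Bool.false_eq_true, if_false]
      rw [ih d hd (ls ++ [line]) hh]
      simp [hlf]

lemma loop_pre (lines : List String) :
    ∀ (d : PySem.Dict String Int) (ls : List String),
    pvFin (lines.foldl pvStepA (d, "", ls)) = (pvSegments lines).foldl pvIns d := by
  induction lines with
  | nil => intro d ls; simp [pvFin, pvSegments]
  | cons line rest ih =>
    intro d ls
    by_cases hl : pvIsHdr line = true
    · have hne := strip_hdr_ne line hl
      simp only [List.foldl, pvStepA, hl, if_pos]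
      have : pvFin (d, "", ls) = d := by simp [pvFin]
      rw [this, loop_mid rest d (PySem.Str.strip line) [] hne]
      simp [pvSegments, hl]
    · have hlf : pvIsHdr line = false := Bool.eq_false_iff.mpr hl
      simp only [List.foldl, pvStepA, hlf, Bool.false_eq_true, if_false]
      rw [ih d (ls ++ [line])]
      simp [pvSegments, hlf]

-- ===== VERDICT (by name: the statement is the Claim_ definition above) =====
theorem analyze_section_sizes_py_spec : Claim_equal_analyze_section_sizes_py := by
  intro content _
  unfold Spec_analyze_section_sizes_py analyze_section_sizes_py analyze_section_sizes_py_alt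
  rw [loop_pre]
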